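-- pv_equiv track=rewrite | github.com/violentzone/bric_demo | create/util.py | add_same_leavetype
-- ===== SOURCE A (Python) =====
-- def add_same_leavetype(sql_tuple: tuple) -> dict:
--     """
--     Add identical leave type and forming a dict of {leave_type_index: hours}
--
--     Parameter
--     ========
--     sql_tuple: The tuple[(leave_type_index, hours)] queried from pymysql
--
--     Return
--     ========
--     {leave_type_index: hours}
--     """
--     d = {}
--     for i in sql_tuple:
--         if i[0] not in d:
--             d[i[0]] = i[1]
--         else:
--             d[i[0]] = d[i[0]] + i[1]
--     return d
-- ===== SOURCE B (Python) =====
-- def add_same_leavetype(sql_tuple: tuple) -> dict: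
--     """Group-extract: repeatedly take the first remaining leave type, sum all
--     its hours in one scan, drop those entries, and recurse on the rest."""
--     result = {}
--     items = list(sql_tuple)
--     while items:
--         k = items[0][0]
--         result[k] = sum(h for t, h in items if t == k)
--         items = [(t, h) for t, h in items if t != k]
--     return result
-- ===== Notes on version B (the rewrite author's own statement) =====
-- stated objective: alternative
-- what changed: Replaces the hash-dict running accumulation with a group-extraction pass: repeatedly take the first remaining key, sum all its hours in one scan, and filter those entries out before recursing on the remainder.
import Mathlib
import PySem

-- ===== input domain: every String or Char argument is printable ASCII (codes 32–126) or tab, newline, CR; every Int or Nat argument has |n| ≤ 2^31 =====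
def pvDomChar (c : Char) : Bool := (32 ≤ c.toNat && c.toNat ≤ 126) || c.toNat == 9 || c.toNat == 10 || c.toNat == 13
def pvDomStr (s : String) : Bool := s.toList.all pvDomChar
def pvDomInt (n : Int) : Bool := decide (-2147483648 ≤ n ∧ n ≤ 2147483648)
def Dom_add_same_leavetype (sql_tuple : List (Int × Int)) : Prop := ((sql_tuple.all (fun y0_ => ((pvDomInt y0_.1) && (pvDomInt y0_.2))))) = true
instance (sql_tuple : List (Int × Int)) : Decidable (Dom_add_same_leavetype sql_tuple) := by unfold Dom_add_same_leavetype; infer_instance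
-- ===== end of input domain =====

-- B replaces A's hash-dict running accumulation with a group-extraction recursion
-- (sum the first key's hours in one scan, filter it out, recurse); objective: alternative.

-- ===== PORT A =====
-- Python A: d = {}; for i in sql_tuple: d[i[0]] = i[1] if i[0] not in d else d[i[0]] + i[1]; return d
def add_same_leavetype (sql_tuple : List (Int × Int)) : List (Int × Int) :=
  (sql_tuple.foldl
    (fun d i =>
      if d.contains i.1 = false then d.insert i.1 i.2
      else d.insert i.1 (d.getD i.1 0 + i.2))
    PySem.Dict.empty).items

-- ===== PORT B =====
-- B's loop: while items: k = items[0][0]; result[k] = sum of matching hours; items = non-matching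
def add_same_leavetype_alt_go : List (Int × Int) → List (Int × Int)
  | [] => []
  | (k, v) :: rest =>
      (k, ((((k, v) :: rest).filter (fun p => p.1 == k)).map (·.2)).sum)
        :: add_same_leavetype_alt_go (rest.filter (fun p => p.1 != k))
termination_by l => l.length
decreasing_by
  simp only [List.length_unattach]
  exact Nat.lt_succ_of_le (le_trans (List.length_filter_le _ _) (by simp))

def add_same_leavetype_alt (sql_tuple : List (Int × Int)) : List (Int × Int) :=
  add_same_leavetype_alt_go sql_tuple

-- ===== PRECONDITION & SPEC =====
def Spec_add_same_leavetype (sql_tuple : List (Int × Int)) (out : List (Int × Int)) : Prop := out = add_same_leavetype_alt sql_tuple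
instance (sql_tuple : List (Int × Int)) (out : List (Int × Int)) : Decidable (Spec_add_same_leavetype sql_tuple out) := by unfold Spec_add_same_leavetype; infer_instance

-- ===== CLAIM (what is proved, stated in full; the proofs are below) =====
def Claim_equal_add_same_leavetype : Prop := ∀ (sql_tuple : List (Int × Int)), Dom_add_same_leavetype sql_tuple → Spec_add_same_leavetype sql_tuple (add_same_leavetype sql_tuple)

-- ===== LEMMAS AND PROOFS =====

-- sum of hours recorded for key k in l
def keySum (k : Int) (l : List (Int × Int)) : Int :=
  ((l.filter (fun p => p.1 == k)).map (·.2)).sum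

def stepA (d : PySem.Dict Int Int) (i : Int × Int) : PySem.Dict Int Int :=
  if d.contains i.1 = false then d.insert i.1 i.2
  else d.insert i.1 (d.getD i.1 0 + i.2)

theorem keySum_nil (k : Int) : keySum k [] = 0 := rfl

theorem keySum_cons (k : Int) (p : Int × Int) (l : List (Int × Int)) :
    keySum k (p :: l) = (if p.1 == k then p.2 else 0) + keySum k l := by
  simp only [keySum, List.filter_cons]
  split <;> simp

-- the main invariant: folding A's step over l from a nodup-key dict d
theorem foldl_stepA_items (l : List (Int × Int)) :
    ∀ d : PySem.Dict Int Int, d.keys.Nodup →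
    (l.foldl stepA d).items
      = d.items.map (fun p => (p.1, p.2 + keySum p.1 l))
        ++ add_same_leavetype_alt_go (l.filter (fun p => !(d.contains p.1))) := by
  induction l with
  | nil =>
      intro d _
      simp [keySum_nil, add_same_leavetype_alt_go]
  | cons hd tl ih =>
      intro d hnd
      obtain ⟨k, v⟩ := hd
      simp only [List.foldl_cons]
      by_cases hc : d.contains k = true
      · -- key already present
        have hstep : stepA d (k, v) = d.insert k (d.getD k 0 + v) := by
          simp [stepA, hc]
        rw [hstep, ih _ (PySem.Dict.nodup_keys_insert d k _ hnd)]
        have hcont : ∀ x, (d.insert k (d.getD k 0 + v)).contains x = d.contains x := by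
          intro x
          rw [PySem.Dict.contains_insert]
          by_cases hx : x = k
          · subst hx; simp [hc]
          · simp [hx]
        have hfilt : tl.filter (fun p => !((d.insert k (d.getD k 0 + v)).contains p.1))
            = tl.filter (fun p => !(d.contains p.1)) := by
          apply List.filter_congr; intro p _; rw [hcont]
        have hfilt2 : ((k, v) :: tl).filter (fun p => !(d.contains p.1))
            = tl.filter (fun p => !(d.contains p.1)) := by
          simp [hc]
        rw [hfilt, hfilt2]
        congr 1
        rw [PySem.Dict.items_insert_of_contains _ _ hc, List.map_map]
        apply List.map_congr_left
        intro p hp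
        by_cases hpk : p.1 = k
        · have hpe : p = (k, p.2) := by cases p; simp_all
          have hval : d.getD k 0 = p.2 := PySem.Dict.getD_of_mem_items d (hpe ▸ hp) hnd 0
          simp only [Function.comp, hpk, beq_self_eq_true, if_pos]
          simp only [keySum_cons, beq_self_eq_true, if_pos]
          rw [hval, hpe]
          simp [add_assoc]
        · have hb : (p.1 == k) = false := by simp [hpk]
          simp only [Function.comp, hb]
          rw [keySum_cons]
          have hb2 : (k == p.1) = false := beq_eq_false_iff_ne.mpr (fun h => hpk h.symm)
          simp [hb2]
      · -- fresh key
        have hc' : d.contains k = false := by simpa using hc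
        have hstep : stepA d (k, v) = d.insert k v := by simp [stepA, hc']
        rw [hstep, ih _ (PySem.Dict.nodup_keys_insert d k v hnd)]
        rw [PySem.Dict.items_insert_of_not_contains _ _ hc']
        -- head of B's recursion on the filtered list
        have hkeep : ((k, v) :: tl).filter (fun p => !(d.contains p.1))
            = (k, v) :: tl.filter (fun p => !(d.contains p.1)) := by
          simp [hc']
        rw [hkeep]
        rw [add_same_leavetype_alt_go]
        -- identify the two tails
        have htail : (tl.filter (fun p => !(d.contains p.1))).filter (fun p => p.1 != k)
            = tl.filter (fun p => !((d.insert k v).contains p.1)) := by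
          rw [List.filter_filter]
          apply List.filter_congr
          intro p _
          rw [PySem.Dict.contains_insert]
          by_cases hpk : p.1 = k
          · simp [hpk, bne]
          · simp [bne]
        -- identify the two head sums
        have hsum : ((((k, v) :: tl.filter (fun p => !(d.contains p.1))).filter
              (fun p => p.1 == k)).map (·.2)).sum = v + keySum k tl := by
          show keySum k ((k, v) :: tl.filter (fun p => !(d.contains p.1))) = v + keySum k tl
          rw [keySum_cons]
          simp only [beq_self_eq_true, if_pos]
          congr 1
          unfold keySum
          rw [List.filter_filter]
          congr 2
          apply List.filter_congr
          intro p _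
          by_cases hpk : (p.1 == k) = true
          · have : p.1 = k := by simpa using hpk
            simp [this, hc']
          · simp [hpk]
        rw [htail, hsum]
        -- lists: d.items.map(... (k,v)::tl) ++ rec  =  (d.items ++ [(k,v)]).map(... tl) ++ rec
        have hmap : d.items.map (fun p => (p.1, p.2 + keySum p.1 ((k, v) :: tl)))
            = d.items.map (fun p => (p.1, p.2 + keySum p.1 tl)) := by
          apply List.map_congr_left
          intro p hp
          have hpk : p.1 ≠ k := by
            intro h
            have : k ∈ d.keys := by
              rw [← h]; exact PySem.Dict.mem_keys_of_mem_items d hp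
            rw [← PySem.Dict.contains_iff_mem_keys] at this
            rw [hc'] at this; exact Bool.false_ne_true this
          rw [keySum_cons]
          have hb2 : (k == p.1) = false := beq_eq_false_iff_ne.mpr (fun h => hpk h.symm)
          simp [hb2]
        rw [hmap]
        simp

-- ===== VERDICT (by name: the statement is the Claim_ definition above) =====
theorem add_same_leavetype_spec : Claim_equal_add_same_leavetype := by
  intro l _
  show add_same_leavetype l = add_same_leavetype_alt l
  unfold add_same_leavetype add_same_leavetype_alt
  have h := foldl_stepA_items l PySem.Dict.empty (by simp)
  have hf : l.filter (fun p => !((PySem.Dict.empty : PySem.Dict Int Int).contains p.1)) = l := by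
    apply List.filter_eq_self.mpr
    intro p _
    simp [PySem.Dict.contains_empty]
  rw [hf] at h
  simpa [stepA, PySem.Dict.items, PySem.Dict.empty] using h
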